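-- pv_equiv track=rewrite | github.com/alicerunsonfedora/srctools | srctools/fgd.py | match_tags
-- ===== SOURCE A (Python) =====
-- from typing import (
--     Optional, Union, overload,
--     TypeVar, Callable, Type,
--     Dict, Tuple, List, Set, FrozenSet,
--     Mapping, Iterator, Iterable, Collection,
--     BinaryIO, TextIO,
--     Container,
-- )
--
-- def match_tags(search: Container[str], tags: Iterable[str]):
--     """Check if the search constraints satisfy tags.
--
--     The search tags should be uppercased.
--
--     All !tags or -tags cannot be present, all +tags must be present, and
--     at lest one normal tag must be present (if they are) to pass.
--     """
--     if not tags: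
--         return True
--
--     has_all = '<ALL>' in search
--     # None = no normal tags, True = matched one, False = not matched one.
--     matched = None
--     for tag in tags:
--         tag = tag.upper()
--         start = tag[0:1]
--         if start == '!' or start == '-':
--             if tag[1:] in search:
--                 return False
--         elif start == '+':
--             if tag[1:] not in search:
--                 return False
--         else:
--             if matched is None:
--                 matched = False
--             if has_all or tag in search:
--                 matched = True
--
--     return matched is not False
-- ===== SOURCE B (Python) =====
-- def match_tags(search, tags):
--     """Check if the search constraints satisfy tags (group-then-check form)."""
--     up = [t.upper() for t in tags]
--     if not up:
--         return True
--     # Any forbidden tag present, or any required tag absent -> fail.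
--     if any(t[1:] in search for t in up if t[:1] in ('!', '-')):
--         return False
--     if any(t[1:] not in search for t in up if t[:1] == '+'):
--         return False
--     normal = [t for t in up if t[:1] not in ('!', '-', '+')]
--     if not normal:
--         return True
--     return '<ALL>' in search or any(t in search for t in normal)
-- ===== Notes on version B (the rewrite author's own statement) =====
-- stated objective: simpler
-- what changed: Replaces A's single-pass tri-state 'matched' accumulator with a group-then-evaluate structure: uppercase once, fail fast on forbidden/required tags, then decide from the collected normal tags.
import Mathlib
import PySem

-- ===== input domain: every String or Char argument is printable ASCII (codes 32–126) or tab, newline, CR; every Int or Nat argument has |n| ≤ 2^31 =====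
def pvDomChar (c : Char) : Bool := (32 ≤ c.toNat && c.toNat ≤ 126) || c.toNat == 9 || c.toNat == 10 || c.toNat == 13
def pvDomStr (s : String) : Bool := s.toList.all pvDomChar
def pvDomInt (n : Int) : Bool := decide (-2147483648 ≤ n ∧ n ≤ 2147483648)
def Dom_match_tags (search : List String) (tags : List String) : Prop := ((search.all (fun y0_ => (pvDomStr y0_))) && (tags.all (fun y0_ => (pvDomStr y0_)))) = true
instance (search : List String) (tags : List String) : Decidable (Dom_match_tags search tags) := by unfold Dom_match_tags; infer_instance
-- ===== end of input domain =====

-- B replaces A's single-pass tri-state `matched` accumulator with a group-then-evaluate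
-- structure (fail fast on forbidden/required tags, then judge the collected normal tags); objective: simpler.


-- shared helpers: Python's tag[0:1] and tag[1:]
def pyHead (t : String) : String := PySem.Str.slice t (some 0) (some 1)
def pyTail (t : String) : String := PySem.Str.slice t (some 1) none

-- ===== PORT A =====
-- the `for tag in tags` loop with its tri-state `matched` accumulator and early `return False`
def matchTagsLoop (search : List String) (hasAll : Bool) (matched : Option Bool) :
    List String → Bool
  | [] => matched ≠ some false
  | t :: rest =>
    let tag := PySem.Str.upper t
    let start := pyHead tag
    if start = "!" || start = "-" then
      if search.contains (pyTail tag) then false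
      else matchTagsLoop search hasAll matched rest
    else if start = "+" then
      if ! search.contains (pyTail tag) then false
      else matchTagsLoop search hasAll matched rest
    else
      let m1 := if matched = none then some false else matched
      let m2 := if hasAll || search.contains tag then some true else m1
      matchTagsLoop search hasAll m2 rest

def match_tags (search : List String) (tags : List String) : Bool :=
  if tags.isEmpty then true
  else matchTagsLoop search (search.contains "<ALL>") none tags

-- ===== PORT B =====
def match_tags_alt (search : List String) (tags : List String) : Bool :=
  let up := tags.map PySem.Str.upper
  if up.isEmpty then true
  else if up.any (fun t => (pyHead t = "!" || pyHead t = "-") && search.contains (pyTail t)) then false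
  else if up.any (fun t => pyHead t = "+" && ! search.contains (pyTail t)) then false
  else
    let normal := up.filter (fun t => !(pyHead t = "!" || pyHead t = "-" || pyHead t = "+"))
    if normal.isEmpty then true
    else search.contains "<ALL>" || normal.any (fun t => search.contains t)

-- ===== PRECONDITION & SPEC =====
def Spec_match_tags (search : List String) (tags : List String) (out : Bool) : Prop := out = match_tags_alt search tags
instance (search : List String) (tags : List String) (out : Bool) : Decidable (Spec_match_tags search tags out) := by unfold Spec_match_tags; infer_instance

-- ===== CLAIM (what is proved, stated in full; the proofs are below) =====
def Claim_equal_match_tags : Prop := ∀ (search : List String) (tags : List String), Dom_match_tags search tags → Spec_match_tags search tags (match_tags search tags)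

-- ===== LEMMAS AND PROOFS =====

-- proof-only abbreviations (on already-uppercased tags)
def isBad (search : List String) (t : String) : Bool :=
  ((pyHead t = "!" || pyHead t = "-") && search.contains (pyTail t)) ||
  (pyHead t = "+" && ! search.contains (pyTail t))

def isNormal (t : String) : Bool :=
  !(pyHead t = "!" || pyHead t = "-" || pyHead t = "+")

lemma any_or_left (h : Bool) (c : String → Bool) (ns : List String) (hne : ns ≠ []) :
    ns.any (fun t => h || c t) = (h || ns.any c) := by
  cases ns with
  | nil => exact absurd rfl hne
  | cons x l => cases h <;> simp

lemma any_split {α : Type} (p q : α → Bool) (l : List α) :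
    l.any (fun x => p x || q x) = (l.any p || l.any q) := by
  induction l with
  | nil => simp
  | cons a l ih => simp [ih, Bool.or_assoc, Bool.or_left_comm]

-- characterisation of A's loop, generalized over the accumulator
lemma loop_eq (search : List String) (hasAll : Bool) (ts : List String) (m : Option Bool) :
    matchTagsLoop search hasAll m ts =
      if ts.any (fun t => isBad search (PySem.Str.upper t)) then false
      else
        (let ns := (ts.map PySem.Str.upper).filter isNormal
         if ns.isEmpty then decide (m ≠ some false)
         else decide (m = some true) || ns.any (fun t => hasAll || search.contains t)) := by
  induction ts generalizing m with
  | nil => simp [matchTagsLoop]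
  | cons t rest ih =>
    simp only [matchTagsLoop]
    by_cases hbang : pyHead (PySem.Str.upper t) = "!" ∨ pyHead (PySem.Str.upper t) = "-"
    · by_cases hc : pyTail (PySem.Str.upper t) ∈ search
      · rcases hbang with h | h <;> simp [isBad, h, hc]
      · rcases hbang with h | h <;> simp [isBad, isNormal, h, hc, ih]
    · push_neg at hbang
      obtain ⟨hb1, hb2⟩ := hbang
      by_cases hplus : pyHead (PySem.Str.upper t) = "+"
      · by_cases hc : pyTail (PySem.Str.upper t) ∈ search
        · simp [isBad, isNormal, hb1, hb2, hplus, hc, ih]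
        · simp [isBad, hplus, hc, hb1, hb2]
      · -- normal tag
        have hbad : isBad search (PySem.Str.upper t) = false := by
          simp [isBad, hb1, hb2, hplus]
        have hnorm : isNormal (PySem.Str.upper t) = true := by
          simp [isNormal, hb1, hb2, hplus]
        simp only [if_neg hplus, ih, hbad]
        have hcond : (decide (pyHead (PySem.Str.upper t) = "!") ||
            decide (pyHead (PySem.Str.upper t) = "-")) = false := by simp [hb1, hb2]
        rw [if_neg (by simp [hcond])]
        simp only [List.any_cons, hbad, Bool.false_or, List.map_cons, List.filter_cons, hnorm,
          if_pos rfl, List.isEmpty_cons]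
        by_cases hrest : ((rest.map PySem.Str.upper).filter isNormal).isEmpty = true
        · have hallf : ∀ a ∈ rest, isNormal (PySem.Str.upper a) = false := by
            intro a ha
            have h0 := List.filter_eq_nil_iff.mp (List.isEmpty_iff.mp hrest)
            exact Bool.not_eq_true _ ▸ (h0 _ (List.mem_map_of_mem ha))
          have hrf : (rest.any (fun a => isNormal (PySem.Str.upper a) &&
              (hasAll || decide (PySem.Str.upper a ∈ search)))) = false := by
            simp only [List.any_eq_false]
            intro a ha
            simp [hallf a ha]
          simp only [hrest, if_pos rfl]
          by_cases hm : hasAll = true ∨ PySem.Str.upper t ∈ search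
          · cases m with
            | none => rcases hm with h | h <;> simp [h, Function.comp, hrf]
            | some b => rcases hm with h | h <;> cases b <;> simp [h, Function.comp, hrf]
          · have hm1 : hasAll = false := by
              cases hasAll
              · rfl
              · exact absurd (Or.inl rfl) hm
            have hm2 : PySem.Str.upper t ∉ search := fun h => hm (Or.inr h)
            have hrf2 : rest.any ((fun a => isNormal a && decide (a ∈ search)) ∘ PySem.Str.upper)
                = false := by
              simp only [List.any_eq_false, Function.comp_apply]
              intro a ha
              simp [hallf a ha]
            cases m with
            | none => simp [hm1, hm2, Function.comp, hrf2]
            | some b => cases b <;> simp [hm1, hm2, Function.comp, hrf2, hrf]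
        · have hne : (rest.map PySem.Str.upper).filter isNormal ≠ [] := by
            simpa [List.isEmpty_iff] using hrest
          simp only [hrest, Bool.false_eq_true, if_false]
          rw [any_or_left _ _ _ hne]
          by_cases hm : hasAll = true ∨ PySem.Str.upper t ∈ search
          · cases m with
            | none => rcases hm with h | h <;> simp [h, Function.comp, Bool.or_comm, Bool.or_left_comm]
            | some b => rcases hm with h | h <;> cases b <;>
                simp [h, Function.comp, Bool.or_comm, Bool.or_left_comm]
          · have hm1 : hasAll = false := by
              cases hasAll
              · rfl
              · exact absurd (Or.inl rfl) hm
            have hm2 : PySem.Str.upper t ∉ search := fun h => hm (Or.inr h)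
            cases m with
            | none => simp [hm1, hm2, Function.comp]
            | some b => cases b <;> simp [hm1, hm2, Function.comp]

-- ===== VERDICT (by name: the statement is the Claim_ definition above) =====
theorem match_tags_spec : Claim_equal_match_tags := by
  intro search tags _
  unfold Spec_match_tags match_tags match_tags_alt
  by_cases hempty : tags.isEmpty = true
  · simp [hempty]
  · simp only [hempty, Bool.false_eq_true, if_false, List.isEmpty_map]
    rw [loop_eq]
    have hany : (tags.any fun t => isBad search (PySem.Str.upper t)) =
        (((tags.map PySem.Str.upper).any
            (fun t => (decide (pyHead t = "!") || decide (pyHead t = "-")) && search.contains (pyTail t))) ||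
         ((tags.map PySem.Str.upper).any
            (fun t => decide (pyHead t = "+") && ! search.contains (pyTail t)))) := by
      simp only [List.any_map]
      rw [← any_split]
      exact List.any_congr rfl (fun a => by simp [isBad, Function.comp])
    by_cases h1 : ((tags.map PySem.Str.upper).any
        (fun t => (decide (pyHead t = "!") || decide (pyHead t = "-")) && search.contains (pyTail t))) = true
    · have : (tags.any fun t => isBad search (PySem.Str.upper t)) = true := by
        rw [hany, h1]; rfl
      rw [if_pos (by simp [this]), if_pos (by simpa using h1)]
    · simp only [Bool.not_eq_true] at h1
      rw [if_neg (by simpa using h1 : ¬ ((tags.map PySem.Str.upper).any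
          (fun t => (decide (pyHead t = "!") || decide (pyHead t = "-")) && search.contains (pyTail t))) = true)]
      by_cases h2 : ((tags.map PySem.Str.upper).any
          (fun t => decide (pyHead t = "+") && ! search.contains (pyTail t))) = true
      · have : (tags.any fun t => isBad search (PySem.Str.upper t)) = true := by
          rw [hany, h1, h2]; rfl
        rw [if_pos (by simp [this]), if_pos (by simpa using h2)]
      · simp only [Bool.not_eq_true] at h2
        have hnb : (tags.any fun t => isBad search (PySem.Str.upper t)) = false := by
          rw [hany, h1, h2]; rfl
        rw [if_neg (by simp [hnb]), if_neg (by simpa using h2 : ¬ ((tags.map PySem.Str.upper).any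
            (fun t => decide (pyHead t = "+") && ! search.contains (pyTail t))) = true)]
        have hfil : (tags.map PySem.Str.upper).filter isNormal =
            (tags.map PySem.Str.upper).filter
              (fun t => !(decide (pyHead t = "!") || decide (pyHead t = "-") || decide (pyHead t = "+"))) := rfl
        by_cases hn : ((tags.map PySem.Str.upper).filter isNormal).isEmpty = true
        · rw [if_pos (by simpa using hn), if_pos (by rw [← hfil]; simpa using hn)]
          simp
        · simp only [Bool.not_eq_true] at hn
          have hne : (tags.map PySem.Str.upper).filter isNormal ≠ [] := by
            simpa [List.isEmpty_iff] using hn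
          rw [if_neg (by simp [hn]), if_neg (by rw [← hfil]; simp [hn])]
          rw [any_or_left _ _ _ hne, ← hfil]
          simp
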